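-- pv_equiv track=rewrite | github.com/joglr/jomama | sokoban_new.py | mergeTripletsIfSame
-- ===== SOURCE A (Python) =====
-- def mergeTripletsIfSame(arr):
--     i = 0
--     result = []
--
--     while i < len(arr):
--         current = arr[i]
--
--         # Check if the current element and the next one are triplets
--         if isinstance(current, tuple) and len(current) == 3 and i + 1 < len(arr):
--             next_elem = arr[i + 1]
--
--             # Check if the next element is also a triplet and contents are identical
--             if isinstance(next_elem, tuple) and len(next_elem) == 3:
--                 if current == next_elem:
--                     # Merge the two triplets into a fourplet
--                     fourplet = (current[0], current[0], next_elem[0], current[2])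
--                     result.append(fourplet)
--                     # Skip the next triplet since it's merged
--                     i += 2
--                     continue
--
--         # If not a triplet or no merging, append the current element as is
--         result.append(current)
--         i += 1
--
--     return result
-- ===== SOURCE B (Python) =====
-- def mergeTripletsIfSame(arr):
--     result = []
--     pending = None
--     for x in arr:
--         if pending is not None:
--             if isinstance(x, tuple) and len(x) == 3 and x == pending:
--                 result.append((pending[0], pending[0], x[0], pending[2]))
--                 pending = None
--                 continue
--             result.append(pending)
--             pending = None
--         if isinstance(x, tuple) and len(x) == 3:
--             pending = x
--         else:
--             result.append(x)
--     if pending is not None: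
--         result.append(pending)
--     return result
-- ===== Notes on version B (the rewrite author's own statement) =====
-- stated objective: alternative
-- what changed: Replaces the index-based while loop with look-ahead arr[i+1] and skip-by-2 by a single for-loop carrying a one-element 'pending' candidate triplet that is either merged with the next equal triplet or flushed; no index arithmetic.
import Mathlib
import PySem

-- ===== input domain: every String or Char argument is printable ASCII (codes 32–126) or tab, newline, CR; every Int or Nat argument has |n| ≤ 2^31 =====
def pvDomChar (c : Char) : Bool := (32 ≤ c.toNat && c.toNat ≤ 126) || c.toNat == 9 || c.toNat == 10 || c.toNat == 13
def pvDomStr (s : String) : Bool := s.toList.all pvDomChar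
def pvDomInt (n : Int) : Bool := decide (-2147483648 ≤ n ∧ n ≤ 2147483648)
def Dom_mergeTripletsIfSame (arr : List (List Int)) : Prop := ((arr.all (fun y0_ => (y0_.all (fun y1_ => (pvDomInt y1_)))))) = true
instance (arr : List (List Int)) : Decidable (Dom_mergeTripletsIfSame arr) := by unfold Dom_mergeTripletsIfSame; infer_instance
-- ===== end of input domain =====

-- B replaces A's index-based while loop (look-ahead arr[i+1], skip-by-2) by a single
-- for-loop over the elements carrying a one-slot 'pending' candidate triplet (alternative
-- decomposition, same O(n) cost).

-- ===== PORT A =====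
-- A's while loop over index i: the three patterns are i = len (stop), i+1 = len (no
-- look-ahead possible, plain append) and i+1 < len (look-ahead at arr[i+1]); the merge
-- branch advances i by 2, the append branch by 1.  Elements are tuples of ints (List Int),
-- so 'isinstance(_, tuple)' is always true and only the length-3 tests remain.
-- current[0]/current[2]/next_elem[0] are in range under the length-3 guard, so List.getD
-- with default 0 is exact there.
def mergeTripletsIfSame : List (List Int) → List (List Int)
  | [] => []
  | [c] => [c]
  | c :: n :: rest =>
    if c.length = 3 ∧ n.length = 3 ∧ c = n then
      [c.getD 0 0, c.getD 0 0, n.getD 0 0, c.getD 2 0] :: mergeTripletsIfSame rest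
    else
      c :: mergeTripletsIfSame (n :: rest)

-- ===== PORT B =====
-- one step of Source B's for-loop body: state = (result so far, pending candidate triplet)
def pvStepB (st : List (List Int) × Option (List Int)) (x : List Int) :
    List (List Int) × Option (List Int) :=
  match st with
  | (res, some p) =>
    if x.length = 3 ∧ x = p then
      (res ++ [[p.getD 0 0, p.getD 0 0, x.getD 0 0, p.getD 2 0]], none)
    else if x.length = 3 then (res ++ [p], some x)
    else (res ++ [p, x], none)
  | (res, none) =>
    if x.length = 3 then (res, some x) else (res ++ [x], none)

def mergeTripletsIfSame_alt (arr : List (List Int)) : List (List Int) :=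
  let st := arr.foldl pvStepB ([], none)
  match st.2 with
  | some p => st.1 ++ [p]
  | none => st.1

-- ===== PRECONDITION & SPEC =====
def Spec_mergeTripletsIfSame (arr : List (List Int)) (out : List (List Int)) : Prop := out = mergeTripletsIfSame_alt arr
instance (arr : List (List Int)) (out : List (List Int)) : Decidable (Spec_mergeTripletsIfSame arr out) := by unfold Spec_mergeTripletsIfSame; infer_instance

-- ===== CLAIM (what is proved, stated in full; the proofs are below) =====
def Claim_equal_mergeTripletsIfSame : Prop := ∀ (arr : List (List Int)), Dom_mergeTripletsIfSame arr → Spec_mergeTripletsIfSame arr (mergeTripletsIfSame arr)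

-- ===== LEMMAS AND PROOFS =====

-- flush the final state as Source B does after the loop
def pvFlush (st : List (List Int) × Option (List Int)) : List (List Int) :=
  match st.2 with
  | some p => st.1 ++ [p]
  | none => st.1

lemma goA_cons_not3 (x : List Int) (l : List (List Int)) (hx : ¬ x.length = 3) :
    mergeTripletsIfSame (x :: l) = x :: mergeTripletsIfSame l := by
  cases l with
  | nil => rfl
  | cons y ys => simp [mergeTripletsIfSame, hx]

lemma pvFold_spec (xs : List (List Int)) :
    (∀ res, pvFlush (xs.foldl pvStepB (res, none)) = res ++ mergeTripletsIfSame xs) ∧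
    (∀ res p, p.length = 3 →
      pvFlush (xs.foldl pvStepB (res, some p)) = res ++ mergeTripletsIfSame (p :: xs)) := by
  induction xs with
  | nil =>
    constructor
    · intro res; simp [pvFlush, mergeTripletsIfSame]
    · intro res p _; simp [pvFlush, mergeTripletsIfSame]
  | cons x xs ih =>
    constructor
    · intro res
      by_cases hx : x.length = 3
      · simp only [List.foldl_cons, pvStepB, hx, if_true]
        exact ih.2 res x hx
      · simp only [List.foldl_cons, pvStepB, hx, if_false]
        rw [ih.1, goA_cons_not3 x xs hx]; simp
    · intro res p hp
      by_cases hm : x.length = 3 ∧ x = p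
      · have hpx : p = x := hm.2.symm
        simp only [List.foldl_cons, pvStepB]
        rw [if_pos hm, ih.1]
        subst hpx
        simp [mergeTripletsIfSame, hp]
      · by_cases hx : x.length = 3
        · have hne : ¬ x = p := fun h => hm ⟨hx, h⟩
          simp only [List.foldl_cons, pvStepB]
          rw [if_neg hm, if_pos hx, ih.2 _ x hx]
          have : ¬ (p.length = 3 ∧ x.length = 3 ∧ p = x) := by
            intro h; exact hne h.2.2.symm
          simp [mergeTripletsIfSame, this]
        · simp only [List.foldl_cons, pvStepB]
          rw [if_neg hm, if_neg hx, ih.1]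
          have hns : ¬ (p.length = 3 ∧ x.length = 3 ∧ p = x) := fun h => hx h.2.1
          simp [mergeTripletsIfSame, hns, goA_cons_not3 x xs hx]

-- ===== VERDICT (by name: the statement is the Claim_ definition above) =====
theorem mergeTripletsIfSame_spec : Claim_equal_mergeTripletsIfSame := by
  intro arr _
  unfold Spec_mergeTripletsIfSame mergeTripletsIfSame_alt
  have h := (pvFold_spec arr).1 []
  simpa [pvFlush] using h.symm
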